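-- pv_equiv track=rewrite | github.com/ribhavfalwaria-grt1/multi-swe-bench | multi_swe_bench/harness/repos/cpp/AMReXCodes/amrex.py | _directory_prefix
-- ===== SOURCE A (Python) =====
-- def _directory_prefix(name: str) -> str:
--     """Extract the top-level test directory from a ctest-style name.
--
--     ``Particles_ParticleMesh`` -> ``Particles``
--     ``CallNoinline`` -> ``CallNoinline``
--     ``LinearSolvers_CurlCurl`` -> ``LinearSolvers``
--
--     This matches the GNUmakefile convention where the test name is just
--     the Tests/<dir> directory name.
--     """
--     # Known multi-word directory prefixes in AMReX Tests/
--     _KNOWN_PREFIXES = [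
--         "LinearSolvers", "Advection_AmrLevel", "Advection_AmrCore",
--         "Amr_Advection_AmrLevel", "Amr_Advection_AmrCore",
--         "MultiBlock",
--     ]
--     for prefix in _KNOWN_PREFIXES:
--         normalized_prefix = prefix.replace("/", "_")
--         if name.startswith(normalized_prefix + "_") or name == normalized_prefix:
--             return normalized_prefix
--     parts = name.split("_")
--     return parts[0] if parts else name
-- ===== SOURCE B (Python) =====
-- _KNOWN_PREFIXES = {
--     "LinearSolvers", "Advection_AmrLevel", "Advection_AmrCore",
--     "Amr_Advection_AmrLevel", "Amr_Advection_AmrCore",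
--     "MultiBlock",
-- }
--
--
-- def _directory_prefix(name: str) -> str:
--     parts = name.split("_")
--     for k in range(len(parts), 0, -1):
--         if "_".join(parts[:k]) in _KNOWN_PREFIXES:
--             return "_".join(parts[:k])
--     # split("_") never returns an empty list, so parts[0] always exists
--     return parts[0]
-- ===== Notes on version B (the rewrite author's own statement) =====
-- stated objective: alternative
-- what changed: Instead of scanning each known prefix with startswith (after a no-op '/'-to-'_' replace), B splits the name into '_'-separated tokens once and looks up joined token prefixes, longest first, in a set of known prefixes; correctness of longest-first lookup rests on no known prefix being a token-boundary prefix of another.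
import Mathlib
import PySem

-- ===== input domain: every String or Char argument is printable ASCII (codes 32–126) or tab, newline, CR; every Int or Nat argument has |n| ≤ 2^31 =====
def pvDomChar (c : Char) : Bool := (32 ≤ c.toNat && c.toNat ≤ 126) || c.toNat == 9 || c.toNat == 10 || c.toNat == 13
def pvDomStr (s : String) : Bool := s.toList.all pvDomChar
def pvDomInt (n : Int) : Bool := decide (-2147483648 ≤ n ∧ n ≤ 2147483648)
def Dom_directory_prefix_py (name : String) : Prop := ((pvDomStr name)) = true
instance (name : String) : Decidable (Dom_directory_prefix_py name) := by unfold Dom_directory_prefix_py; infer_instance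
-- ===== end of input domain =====

-- B re-implements the known-prefix scan as tokenize-then-lookup (split once, try joined token
-- prefixes longest first against a set); equal return value proved for all inputs (A is total).

-- name.split("_"): PySem.Chars.splitOn on the code points, repacked into strings
-- (PySem has no String-level splitOn wrapper); exact port of str.split with a nonempty separator.
def pvSplitU (s : String) : List String :=
  (PySem.Chars.splitOn s.toList ['_']).map String.ofList

-- ===== PORT A =====
-- A's local _KNOWN_PREFIXES list
def pvKnownPrefixes : List String :=
  ["LinearSolvers", "Advection_AmrLevel", "Advection_AmrCore",
   "Amr_Advection_AmrLevel", "Amr_Advection_AmrCore", "MultiBlock"]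

-- A's 'for prefix in _KNOWN_PREFIXES' loop: first match wins, else none
def pvALoop (name : String) : List String → Option String
  | [] => none
  | p :: rest =>
    let normalized := PySem.Str.replace p "/" "_"
    if PySem.Str.startswith name (normalized ++ "_") || name == normalized then some normalized
    else pvALoop name rest

def directory_prefix_py (name : String) : String :=
  match pvALoop name pvKnownPrefixes with
  | some np => np
  | none =>
    match pvSplitU name with   -- parts[0] if parts else name
    | [] => name
    | p :: _ => p

-- ===== PORT B =====
-- B's module-level _KNOWN_PREFIXES set
def pvKnownSet : PySem.Set String :=
  PySem.Set.ofList ["LinearSolvers", "Advection_AmrLevel", "Advection_AmrCore",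
    "Amr_Advection_AmrLevel", "Amr_Advection_AmrCore", "MultiBlock"]

-- B's 'for k in range(len(parts), 0, -1)' loop, counting k down to 1
def pvBLoop (parts : List String) : Nat → Option String
  | 0 => none
  | k + 1 =>
    if PySem.Set.contains pvKnownSet (PySem.Str.join "_" (parts.take (k + 1))) then
      some (PySem.Str.join "_" (parts.take (k + 1)))
    else pvBLoop parts k

def directory_prefix_py_alt (name : String) : String :=
  let parts := pvSplitU name
  match pvBLoop parts parts.length with
  | some c => c
  | none =>
    match parts with   -- parts[0]; split("_") never returns an empty list
    | [] => name
    | p :: _ => p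

-- ===== PRECONDITION & SPEC =====
def Spec_directory_prefix_py (name : String) (out : String) : Prop := out = directory_prefix_py_alt name
instance (name : String) (out : String) : Decidable (Spec_directory_prefix_py name out) := by unfold Spec_directory_prefix_py; infer_instance

-- ===== CLAIM (what is proved, stated in full; the proofs are below) =====
def Claim_equal_directory_prefix_py : Prop := ∀ (name : String), Dom_directory_prefix_py name → Spec_directory_prefix_py name (directory_prefix_py name)

-- ===== LEMMAS AND PROOFS =====

-- A simple structural recursion computing split-on-'_' on char lists; proofs about
-- PySem.Chars.splitOn (fuel/accumulator-based) go through this reformulation.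
def pvSplit1 : List Char → List (List Char)
  | [] => [[]]
  | c :: rest =>
    if c = '_' then [] :: pvSplit1 rest
    else match pvSplit1 rest with
      | [] => [[c]]
      | p :: ps => (c :: p) :: ps

theorem pvSplit1_ne_nil (l : List Char) : pvSplit1 l ≠ [] := by
  cases l with
  | nil => simp [pvSplit1]
  | cons c rest =>
    simp only [pvSplit1]
    split
    · simp
    · split <;> simp

theorem pvGo_eq (fuel : Nat) : ∀ (l cur : List Char) (acc : List (List Char)), l.length < fuel →
    PySem.Chars.splitOn.go ['_'] fuel l cur acc
      = acc.reverse ++ (pvSplit1 l).modifyHead (cur.reverse ++ ·) := by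
  induction fuel with
  | zero => intro l cur acc h; omega
  | succ fuel ih =>
    intro l cur acc h
    cases l with
    | nil =>
      rw [PySem.Chars.splitOn.go.eq_def]
      simp [pvSplit1]
    | cons c rest =>
      rw [PySem.Chars.splitOn.go.eq_def]
      simp only []
      by_cases hc : c = '_'
      · subst hc
        have hpre : List.isPrefixOf ['_'] ('_' :: rest) = true := by simp [List.isPrefixOf]
        rw [if_pos hpre]
        simp only [List.length_cons, List.length_nil, List.drop_succ_cons, List.drop_zero]
        rw [ih rest [] _ (by simpa using Nat.lt_of_succ_lt_succ (by simpa using h))]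
        simp [pvSplit1]
        cases pvSplit1 rest <;> simp [List.modifyHead]
      · have hpre : List.isPrefixOf ['_'] (c :: rest) = false := by
          simp [List.isPrefixOf]
          exact fun h' => hc h'.symm
        rw [if_neg (by simp [hpre])]
        rw [ih rest (c :: cur) acc (by simpa using Nat.lt_of_succ_lt_succ (by simpa using h))]
        simp only [pvSplit1, if_neg hc]
        rcases hsp : pvSplit1 rest with _ | ⟨p, ps⟩
        · exfalso; exact pvSplit1_ne_nil rest hsp
        · simp [List.modifyHead]

theorem pvSplit_eq (l : List Char) : PySem.Chars.splitOn l ['_'] = pvSplit1 l := by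
  unfold PySem.Chars.splitOn
  rw [pvGo_eq (l.length + 1) l [] [] (by omega)]
  rcases h : pvSplit1 l with _ | ⟨p, ps⟩
  · exact absurd h (pvSplit1_ne_nil l)
  · simp [List.modifyHead]

theorem pvSplit1_free (l : List Char) : ∀ p ∈ pvSplit1 l, '_' ∉ p := by
  induction l with
  | nil => simp [pvSplit1]
  | cons c rest ih =>
    simp only [pvSplit1]
    by_cases hc : c = '_'
    · simpa [hc] using ih
    · rw [if_neg hc]
      rcases hsp : pvSplit1 rest with _ | ⟨p, ps⟩
      · exact absurd hsp (pvSplit1_ne_nil rest)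
      · intro q hq
        rcases List.mem_cons.1 hq with h | h
        · subst h
          intro hm
          rcases List.mem_cons.1 hm with h' | h'
          · exact hc h'.symm
          · exact ih p (by simp [hsp]) h'
        · exact ih q (by simp [hsp, h]) 

theorem pvSplit1_join (l : List Char) : PySem.Chars.join ['_'] (pvSplit1 l) = l := by
  induction l with
  | nil => simp [pvSplit1, PySem.Chars.join_singleton]
  | cons c rest ih =>
    simp only [pvSplit1]
    obtain ⟨p, ps, hsp⟩ := List.exists_cons_of_ne_nil (pvSplit1_ne_nil rest)
    rw [hsp] at ih
    by_cases hc : c = '_'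
    · rw [if_pos hc, hsp, PySem.Chars.join_cons_cons]
      simp [hc, ih]
    · rw [if_neg hc, hsp]
      cases ps with
      | nil =>
        rw [PySem.Chars.join_singleton]
        rw [PySem.Chars.join_singleton] at ih
        simp [ih]
      | cons q qs =>
        rw [PySem.Chars.join_cons_cons]
        rw [PySem.Chars.join_cons_cons] at ih
        simp at ih ⊢
        simp [ih]

theorem pvFirstSep : ∀ (a b x y : List Char), '_' ∉ a → '_' ∉ b →
    a ++ '_' :: x = b ++ '_' :: y → a = b ∧ x = y := by
  intro a
  induction a with
  | nil =>
    intro b x y _ hb h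
    cases b with
    | nil => simpa using h
    | cons d b' =>
      simp at h
      exact (hb (List.mem_cons.2 (Or.inl h.1))).elim
  | cons c a' ih =>
    intro b x y ha hb h
    cases b with
    | nil =>
      simp at h
      exact (ha (List.mem_cons.2 (Or.inl h.1.symm))).elim
    | cons d b' =>
      simp at h
      obtain ⟨rfl, h2⟩ := h
      obtain ⟨h3, h4⟩ := ih b' x y (fun m => ha (List.mem_cons_of_mem _ m))
        (fun m => hb (List.mem_cons_of_mem _ m)) h2
      exact ⟨by rw [h3], h4⟩

theorem pvNotPrefixSep (a b : List Char) (hb : '_' ∉ b) : ¬ (a ++ ['_'] <+: b) := by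
  intro h
  exact hb (List.IsPrefix.sublist h |>.mem (by simp))

theorem pvPrefixSep (a b x y : List Char) (ha : '_' ∉ a) (hb : '_' ∉ b) :
    a ++ '_' :: x <+: b ++ '_' :: y ↔ a = b ∧ x <+: y := by
  constructor
  · rintro ⟨w, hw⟩
    rw [List.append_assoc, List.cons_append] at hw
    obtain ⟨h1, h2⟩ := pvFirstSep a b (x ++ w) y ha hb hw
    exact ⟨h1, ⟨w, h2⟩⟩
  · rintro ⟨rfl, w, rfl⟩
    exact ⟨w, by simp⟩

theorem pvBP : ∀ (ts us : List (List Char)), ts ≠ [] → us ≠ [] →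
    (∀ t ∈ ts, '_' ∉ t) → (∀ u ∈ us, '_' ∉ u) →
    ((PySem.Chars.join ['_'] ts = PySem.Chars.join ['_'] us ∨
      PySem.Chars.join ['_'] ts ++ ['_'] <+: PySem.Chars.join ['_'] us) ↔ ts <+: us) := by
  intro ts
  induction ts with
  | nil => intro us h; exact absurd rfl h
  | cons t ts' ih =>
    intro us _ hus hft hfu
    have hft' : '_' ∉ t := hft t List.mem_cons_self
    cases us with
    | nil => exact absurd rfl hus
    | cons u us' =>
      have hfu' : '_' ∉ u := hfu u List.mem_cons_self
      cases ts' with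
      | nil =>
        rw [PySem.Chars.join_singleton]
        cases us' with
        | nil =>
          rw [PySem.Chars.join_singleton]
          constructor
          · rintro (rfl | h)
            · simp
            · exact absurd h (pvNotPrefixSep t u hfu')
          · intro h
            rcases List.cons_prefix_cons.1 h with ⟨rfl, _⟩
            exact Or.inl rfl
        | cons v us'' =>
          rw [PySem.Chars.join_cons_cons]
          constructor
          · rintro (h | ⟨w, hw⟩)
            · exfalso
              exact hft' (h ▸ (by simp : '_' ∈ u ++ ['_'] ++ PySem.Chars.join ['_'] (v :: us'')))
            · simp only [List.append_assoc, List.singleton_append] at hw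
              obtain ⟨rfl, _⟩ := pvFirstSep t u _ _ hft' hfu' hw
              simp [List.cons_prefix_cons]
          · intro h
            rcases List.cons_prefix_cons.1 h with ⟨rfl, _⟩
            refine Or.inr ⟨PySem.Chars.join ['_'] (v :: us''), by simp⟩
      | cons s ts'' =>
        rw [PySem.Chars.join_cons_cons]
        cases us' with
        | nil =>
          rw [PySem.Chars.join_singleton]
          constructor
          · rintro (h | h)
            · exfalso
              exact hfu' (h ▸ (by simp : '_' ∈ t ++ ['_'] ++ PySem.Chars.join ['_'] (s :: ts'')))
            · exact absurd h (pvNotPrefixSep _ u hfu')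
          · intro h
            rcases List.cons_prefix_cons.1 h with ⟨rfl, h2⟩
            exact absurd (List.prefix_nil.1 h2) (by simp)
        | cons v us'' =>
          rw [PySem.Chars.join_cons_cons]
          have ihx := ih (v :: us'') (by simp) (by simp)
            (fun q hq => hft q (List.mem_cons_of_mem _ hq))
            (fun q hq => hfu q (List.mem_cons_of_mem _ hq))
          constructor
          · rintro (h | h)
            · simp only [List.append_assoc, List.singleton_append] at h
              obtain ⟨rfl, h2⟩ := pvFirstSep t u _ _ hft' hfu' h
              exact List.cons_prefix_cons.2 ⟨rfl, ihx.1 (Or.inl h2)⟩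
            · simp only [List.append_assoc, List.singleton_append] at h
              rw [List.cons_append] at h  -- shape: t ++ '_' :: (J ts' ++ ['_']) <+: u ++ '_' :: J us'
              have h' := (pvPrefixSep t u (PySem.Chars.join ['_'] (s :: ts'') ++ ['_'])
                (PySem.Chars.join ['_'] (v :: us'')) hft' hfu').1 (by
                  simpa [List.append_assoc] using h)
              exact List.cons_prefix_cons.2 ⟨h'.1, ihx.1 (Or.inr h'.2)⟩
          · intro h
            rcases List.cons_prefix_cons.1 h with ⟨rfl, h2⟩
            rcases ihx.2 h2 with h3 | h3
            · exact Or.inl (by simp [h3])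
            · rcases h3 with ⟨w, hw⟩
              refine Or.inr ⟨w, ?_⟩
              simp [← hw]

theorem pvJinj (ts us : List (List Char)) (hts : ts ≠ []) (hus : us ≠ [])
    (hft : ∀ t ∈ ts, '_' ∉ t) (hfu : ∀ u ∈ us, '_' ∉ u)
    (h : PySem.Chars.join ['_'] ts = PySem.Chars.join ['_'] us) : ts = us := by
  have h1 := (pvBP ts us hts hus hft hfu).1 (Or.inl h)
  have h2 := (pvBP us ts hus hts hfu hft).1 (Or.inl h.symm)
  exact h1.eq_of_length (Nat.le_antisymm h1.length_le h2.length_le)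

-- A's per-prefix test, in token-list form
theorem pvCondA (name p : String) :
    (PySem.Str.startswith name (p ++ "_") || name == p) = true
      ↔ pvSplit1 p.toList <+: pvSplit1 name.toList := by
  rw [Bool.or_eq_true, PySem.Str.startswith_eq, PySem.Chars.startswith_iff, beq_iff_eq]
  rw [← String.toList_inj, String.toList_append]
  have hs : ("_" : String).toList = ['_'] := rfl
  rw [hs]
  conv_lhs =>
    rw [← pvSplit1_join p.toList, ← pvSplit1_join name.toList]
  rw [← pvBP (pvSplit1 p.toList) (pvSplit1 name.toList)
    (pvSplit1_ne_nil _) (pvSplit1_ne_nil _) (pvSplit1_free _) (pvSplit1_free _)]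
  constructor
  · rintro (h | h)
    · exact Or.inr h
    · exact Or.inl h.symm
  · rintro (h | h)
    · exact Or.inr h.symm
    · exact Or.inl h

theorem pvFind?_unique {α : Type} (pred : α → Bool) (p : α) : ∀ l : List α,
    p ∈ l → pred p = true → (∀ q ∈ l, pred q = true → q = p) → l.find? pred = some p := by
  intro l
  induction l with
  | nil => simp
  | cons a l' ih =>
    intro hmem hp huniq
    rw [List.find?_cons]
    by_cases ha : pred a = true
    · rw [ha]
      exact congrArg some (huniq a List.mem_cons_self ha)
    · rw [Bool.eq_false_iff.2 ha]
      rcases List.mem_cons.1 hmem with rfl | hmem'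
      · exact absurd hp ha
      · exact ih hmem' hp (fun q hq => huniq q (List.mem_cons_of_mem _ hq))

theorem pvALoop_eq (name : String) : ∀ l : List String,
    (∀ p ∈ l, PySem.Str.replace p "/" "_" = p) →
    pvALoop name l = l.find? (fun p => decide (pvSplit1 p.toList <+: pvSplit1 name.toList)) := by
  intro l
  induction l with
  | nil => intro _; rfl
  | cons p rest ih =>
    intro hrep
    have hr : PySem.Str.replace p "/" "_" = p := hrep p List.mem_cons_self
    rw [List.find?_cons]
    show (if PySem.Str.startswith name (PySem.Str.replace p "/" "_" ++ "_")
            || name == PySem.Str.replace p "/" "_" then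
          some (PySem.Str.replace p "/" "_")
        else pvALoop name rest) = _
    rw [hr]
    by_cases hc : pvSplit1 p.toList <+: pvSplit1 name.toList
    · rw [if_pos ((pvCondA name p).2 hc), decide_eq_true hc]
    · rw [if_neg (fun h => hc ((pvCondA name p).1 h)), decide_eq_false hc]
      exact ih (fun q hq => hrep q (List.mem_cons_of_mem _ hq))

-- no known prefix is a token-boundary prefix of another
theorem pvPairwise : ∀ p ∈ pvKnownPrefixes, ∀ q ∈ pvKnownPrefixes,
    pvSplit1 p.toList <+: pvSplit1 q.toList → p = q := by
  decide

theorem pvUniq (name : String) {p q : String} (hp : p ∈ pvKnownPrefixes) (hq : q ∈ pvKnownPrefixes)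
    (h1 : pvSplit1 p.toList <+: pvSplit1 name.toList)
    (h2 : pvSplit1 q.toList <+: pvSplit1 name.toList) : p = q := by
  rcases List.prefix_or_prefix_of_prefix h1 h2 with h | h
  · exact pvPairwise p hp q hq h
  · exact (pvPairwise q hq p hp h).symm

theorem pvCandToList (name : String) (k : Nat) :
    (PySem.Str.join "_" ((pvSplitU name).take k)).toList
      = PySem.Chars.join ['_'] ((pvSplit1 name.toList).take k) := by
  rw [PySem.Str.toList_join, pvSplitU, pvSplit_eq, ← List.map_take, List.map_map]
  congr 1
  simp [Function.comp_def, String.toList_ofList]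

theorem pvMemKnown (c : String) :
    PySem.Set.contains pvKnownSet c = true ↔ c ∈ pvKnownPrefixes := by
  rw [pvKnownSet, PySem.Set.contains_iff, PySem.Set.mem_ofList]
  rfl

theorem pvTakeTokens_free (name : String) (k : Nat) :
    ∀ t ∈ (pvSplit1 name.toList).take k, '_' ∉ t :=
  fun t ht => pvSplit1_free name.toList t (List.mem_of_mem_take ht)

theorem pvTakeTokens_ne_nil (name : String) (k : Nat) :
    (pvSplit1 name.toList).take (k + 1) ≠ [] := by
  obtain ⟨p, ps, hsp⟩ := List.exists_cons_of_ne_nil (pvSplit1_ne_nil name.toList)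
  rw [hsp]
  simp

theorem pvCandidate_known (name : String) (k : Nat) {q : String} (hq : q ∈ pvKnownPrefixes)
    (h : PySem.Str.join "_" ((pvSplitU name).take (k + 1)) = q) :
    (pvSplit1 name.toList).take (k + 1) = pvSplit1 q.toList := by
  have ht : PySem.Chars.join ['_'] ((pvSplit1 name.toList).take (k + 1))
      = PySem.Chars.join ['_'] (pvSplit1 q.toList) := by
    rw [← pvCandToList, h, pvSplit1_join]
  exact pvJinj _ _ (pvTakeTokens_ne_nil name k) (pvSplit1_ne_nil _)
    (pvTakeTokens_free name _) (pvSplit1_free _) ht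

set_option maxHeartbeats 1000000 in
theorem pvBLoop_none (name : String)
    (h : ∀ p ∈ pvKnownPrefixes, ¬ pvSplit1 p.toList <+: pvSplit1 name.toList) :
    ∀ k, pvBLoop (pvSplitU name) k = none := by
  intro k
  induction k with
  | zero => rfl
  | succ k ih =>
    rw [pvBLoop]
    rw [if_neg, ih]
    intro hmem
    have hq := (pvMemKnown _).1 hmem
    have heq := pvCandidate_known name k hq rfl
    apply h _ hq
    rw [← heq]
    exact List.take_prefix _ _

set_option maxHeartbeats 1000000 in
theorem pvBLoop_found (name p : String) (hp : p ∈ pvKnownPrefixes)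
    (hpre : pvSplit1 p.toList <+: pvSplit1 name.toList) :
    ∀ k, pvBLoop (pvSplitU name) k
      = if (pvSplit1 p.toList).length ≤ k then some p else none := by
  have hm1 : 1 ≤ (pvSplit1 p.toList).length :=
    List.length_pos_iff.2 (pvSplit1_ne_nil _)
  have htake : pvSplit1 p.toList = (pvSplit1 name.toList).take (pvSplit1 p.toList).length :=
    List.prefix_iff_eq_take.1 hpre
  have hmn : (pvSplit1 p.toList).length ≤ (pvSplit1 name.toList).length :=
    hpre.length_le
  intro k
  induction k with
  | zero =>
    rw [if_neg (by omega)]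
    rfl
  | succ k ih =>
    rw [pvBLoop]
    by_cases hk : min (k + 1) (pvSplit1 name.toList).length = (pvSplit1 p.toList).length
    · have htk : (pvSplit1 name.toList).take (k + 1) = pvSplit1 p.toList := by
        rw [htake, List.take_eq_take_iff]
        omega
      have hcand : PySem.Str.join "_" ((pvSplitU name).take (k + 1)) = p := by
        rw [← String.toList_inj, pvCandToList, htk, pvSplit1_join]
      rw [if_pos (by rw [hcand]; exact (pvMemKnown p).2 hp), hcand]
      rw [if_pos (by omega)]
    · have hne : ¬ PySem.Set.contains pvKnownSet
          (PySem.Str.join "_" ((pvSplitU name).take (k + 1))) = true := by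
        intro hmem
        have hq := (pvMemKnown _).1 hmem
        have heq := pvCandidate_known name k hq rfl
        have hpq := pvUniq name hq hp (heq ▸ List.take_prefix _ _) hpre
        rw [hpq] at heq
        have hlen := congrArg List.length heq
        simp at hlen
        exact hk (by omega)
      rw [if_neg hne, ih]
      have hne2 : (pvSplit1 p.toList).length ≠ k + 1 := fun he => hk (by omega)
      by_cases hle : (pvSplit1 p.toList).length ≤ k
      · rw [if_pos hle, if_pos (by omega)]
      · rw [if_neg hle, if_neg (by omega)]

-- ===== VERDICT (by name: the statement is the Claim_ definition above) =====
theorem directory_prefix_py_spec : Claim_equal_directory_prefix_py := by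
  unfold Claim_equal_directory_prefix_py
  intro name _
  unfold Spec_directory_prefix_py
  have hrep : ∀ p ∈ pvKnownPrefixes, PySem.Str.replace p "/" "_" = p := by decide
  by_cases h : ∃ p ∈ pvKnownPrefixes, pvSplit1 p.toList <+: pvSplit1 name.toList
  · obtain ⟨p, hp, hpre⟩ := h
    have hA : directory_prefix_py name = p := by
      unfold directory_prefix_py
      rw [pvALoop_eq name _ hrep, pvFind?_unique _ p _ hp (decide_eq_true hpre)
        (fun q hq hqd => pvUniq name hq hp (of_decide_eq_true hqd) hpre)]
    have hB : directory_prefix_py_alt name = p := by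
      unfold directory_prefix_py_alt
      dsimp only
      rw [pvBLoop_found name p hp hpre, if_pos
        (by rw [pvSplitU, pvSplit_eq, List.length_map]; exact hpre.length_le)]
    rw [hA, hB]
  · push_neg at h
    unfold directory_prefix_py directory_prefix_py_alt
    dsimp only
    rw [pvALoop_eq name _ hrep,
      List.find?_eq_none.2 (fun q hq hqd => h q hq (of_decide_eq_true hqd)),
      pvBLoop_none name h]
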